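-- pv_equiv track=rewrite | github.com/Twodragon0/tech-blog | scripts/lib/svg_l22_generator.py | _split_headline
-- ===== SOURCE A (Python) =====
-- from typing import Dict, List
--
-- def _split_headline(headline: str, max_chars_per_line: int = 22) -> List[str]:
--     """Split headline into 1-2 uppercase lines on word boundary.
--
--     Words are joined with single space; if a single word is too long it stays
--     on its own line. Returns 1 or 2 strings, each <= max_chars_per_line where
--     feasible. Used to keep hero text inside the LEFT TEXT ZONE width (~620px).
--
--     For ultra-long input, drops trailing words rather than adding an
--     ellipsis (avoids the check_posts.py "truncated text" lint).
--     """
--     upper = headline.upper().strip()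
--     if len(upper) <= max_chars_per_line:
--         return [upper]
--     words = upper.split()
--     line_a: List[str] = []
--     line_b: List[str] = []
--     for w in words:
--         candidate_a = (" ".join(line_a + [w])).strip()
--         if len(candidate_a) <= max_chars_per_line and not line_b:
--             line_a.append(w)
--             continue
--         candidate_b = (" ".join(line_b + [w])).strip()
--         if len(candidate_b) <= 30:
--             line_b.append(w)
--         else:
--             # Stop adding words; line_b stays as-is (drops the rest silently).
--             break
--     if not line_b:  # single word longer than limit
--         return [upper[:max_chars_per_line]]
--     return [" ".join(line_a), " ".join(line_b)]
-- ===== SOURCE B (Python) =====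
-- from typing import List
--
-- def _split_headline(headline: str, max_chars_per_line: int = 22) -> List[str]:
--     """Closed-form re-implementation: builds prefix sums of word lengths once,
--     then finds each line's break index by binary search over the monotone
--     joined-length function (instead of greedily packing word by word)."""
--     upper = headline.upper().strip()
--     if len(upper) <= max_chars_per_line:
--         return [upper]
--     words = upper.split()
--     pref = [0]
--     for w in words:
--         pref.append(pref[-1] + len(w))
--
--     def last_fit(lo_idx: int, hi_idx: int, limit: int) -> int:
--         # largest k in [lo_idx, hi_idx] with joined length of words[lo_idx:k]
--         # = pref[k]-pref[lo_idx] + (k-lo_idx) - 1 <= limit; lo_idx if none.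
--         lo, hi = lo_idx, hi_idx
--         while lo < hi:
--             mid = (lo + hi + 1) // 2
--             if pref[mid] - pref[lo_idx] + (mid - lo_idx) - 1 <= limit:
--                 lo = mid
--             else:
--                 hi = mid - 1
--         return lo
--
--     i = last_fit(0, len(words), max_chars_per_line)
--     j = last_fit(i, len(words), 30)
--     if j == i:
--         return [upper[:max_chars_per_line]]
--     return [" ".join(words[:i]), " ".join(words[i:j])]
-- ===== Notes on version B (the rewrite author's own statement) =====
-- stated objective: alternative
-- what changed: Replaces A's single greedy word-by-word packing loop (which re-joins and re-strips the accumulated line for every candidate word) with a prefix-sum-plus-binary-search algorithm: word lengths are prefix-summed once, and each line's break index is found by binary search over the monotone joined-length function pref[k]+k-1, the lines then being produced as slices words[:i] and words[i:j].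
import Mathlib
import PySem

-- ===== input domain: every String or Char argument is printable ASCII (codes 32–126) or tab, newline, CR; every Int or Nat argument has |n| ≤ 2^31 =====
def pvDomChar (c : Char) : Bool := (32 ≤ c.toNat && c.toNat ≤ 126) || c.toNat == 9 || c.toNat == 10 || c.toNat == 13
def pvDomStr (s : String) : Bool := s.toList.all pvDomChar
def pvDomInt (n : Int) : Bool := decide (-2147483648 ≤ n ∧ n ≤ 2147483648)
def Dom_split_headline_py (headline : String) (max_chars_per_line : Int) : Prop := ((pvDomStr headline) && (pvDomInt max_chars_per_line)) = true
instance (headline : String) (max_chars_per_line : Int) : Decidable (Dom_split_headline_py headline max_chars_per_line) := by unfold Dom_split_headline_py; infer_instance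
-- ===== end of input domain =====

-- B replaces A's greedy word-by-word packing loop by prefix sums of word lengths
-- plus a hand-written binary search for each line's break index (objective: alternative).

-- ===== PORT A =====
-- A's candidate length: len((" ".join(xs)).strip())
def aCandLen (xs : List String) : Int :=
  PySem.Str.len (PySem.Str.strip (PySem.Str.join " " xs))

-- A's single for-loop over words carrying (line_a, line_b); early return = break
def aLoop (maxc : Int) : List String → List String → List String → List String × List String
  | [], la, lb => (la, lb)
  | w :: ws, la, lb =>
    if aCandLen (la ++ [w]) ≤ maxc ∧ lb = [] then aLoop maxc ws (la ++ [w]) lb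
    else if aCandLen (lb ++ [w]) ≤ 30 then aLoop maxc ws la (lb ++ [w])
    else (la, lb)

def split_headline_py (headline : String) (max_chars_per_line : Int) : List String :=
  if PySem.Str.len (PySem.Str.strip (PySem.Str.upper headline)) ≤ max_chars_per_line then
    [PySem.Str.strip (PySem.Str.upper headline)]
  else
    if (aLoop max_chars_per_line (PySem.Str.split₀ (PySem.Str.strip (PySem.Str.upper headline))) [] []).2 = [] then
      [PySem.Str.slice (PySem.Str.strip (PySem.Str.upper headline)) none (some max_chars_per_line)]
    else
      [PySem.Str.join " " (aLoop max_chars_per_line (PySem.Str.split₀ (PySem.Str.strip (PySem.Str.upper headline))) [] []).1,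
       PySem.Str.join " " (aLoop max_chars_per_line (PySem.Str.split₀ (PySem.Str.strip (PySem.Str.upper headline))) [] []).2]

-- ===== PORT B =====
-- Source B's `pref = [0]; for w in words: pref.append(pref[-1] + len(w))`,
-- written as a recursion carrying the running last element pref[-1]
def mkPref : List String → Int → List Int
  | [], last => [last]
  | w :: ws, last => last :: mkPref ws (last + PySem.Str.len w)

-- Source B's `while lo < hi` binary-search loop inside last_fit (pref[mid] is always
-- in range because lo_idx ≤ mid ≤ hi_idx ≤ len(words) = len(pref)-1, so getD is exact)
def lfGo (pref : List Int) (loIdx : Nat) (limit : Int) (lo hi : Nat) : Nat :=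
  if h : lo < hi then
    let mid := (lo + hi + 1) / 2
    if pref.getD mid 0 - pref.getD loIdx 0 + (mid : Int) - (loIdx : Int) - 1 ≤ limit then
      lfGo pref loIdx limit mid hi
    else
      lfGo pref loIdx limit lo (mid - 1)
  else lo
termination_by hi - lo
decreasing_by all_goals omega

def split_headline_py_alt (headline : String) (max_chars_per_line : Int) : List String :=
  if PySem.Str.len (PySem.Str.strip (PySem.Str.upper headline)) ≤ max_chars_per_line then
    [PySem.Str.strip (PySem.Str.upper headline)]
  else
    let words := PySem.Str.split₀ (PySem.Str.strip (PySem.Str.upper headline))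
    let pref := mkPref words 0
    let i := lfGo pref 0 max_chars_per_line 0 words.length
    let j := lfGo pref i 30 i words.length
    if j = i then
      [PySem.Str.slice (PySem.Str.strip (PySem.Str.upper headline)) none (some max_chars_per_line)]
    else
      -- words[:i] and words[i:j]; i ≤ j ≤ len(words), so take/drop are exact slices
      [PySem.Str.join " " (words.take i), PySem.Str.join " " ((words.drop i).take (j - i))]

-- ===== PRECONDITION & SPEC =====
def Spec_split_headline_py (headline : String) (max_chars_per_line : Int) (out : List String) : Prop := out = split_headline_py_alt headline max_chars_per_line
instance (headline : String) (max_chars_per_line : Int) (out : List String) : Decidable (Spec_split_headline_py headline max_chars_per_line out) := by unfold Spec_split_headline_py; infer_instance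

-- ===== CLAIM (what is proved, stated in full; the proofs are below) =====
def Claim_equal_split_headline_py : Prop := ∀ (headline : String) (max_chars_per_line : Int), Dom_split_headline_py headline max_chars_per_line → Spec_split_headline_py headline max_chars_per_line (split_headline_py headline max_chars_per_line)

-- ===== LEMMAS AND PROOFS =====

-- a word produced by str.split(): nonempty, no whitespace
def GoodW (w : List Char) : Prop := w ≠ [] ∧ ∀ c ∈ w, PySem.Chars.isspace c = false

def GoodS (w : String) : Prop := GoodW w.toList

-- running joined length of a word list: Σ len + count − 1  (−1 for [])
def U (xs : List String) : Int := (xs.map PySem.Str.len).sum + xs.length - 1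

theorem U_nil : U [] = -1 := by simp [U]

theorem U_append_singleton (xs : List String) (w : String) :
    U (xs ++ [w]) = U xs + 1 + PySem.Str.len w := by
  simp [U]; ring

-- proof-side greedy count: how many leading words the greedy loop of A accepts
def gCount (limit : Int) : List String → Int → Nat
  | [], _ => 0
  | w :: ws, used =>
    if used + 1 + PySem.Str.len w ≤ limit then gCount limit ws (used + 1 + PySem.Str.len w) + 1
    else 0

-- proof-side image of A's second-phase loop (packs into line_b under cap 30)
def bTail : List String → List String → Int → List String
  | [], lb, _ => lb
  | w :: ws, lb, blen =>
    if blen + 1 + PySem.Str.len w > 30 then lb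
    else bTail ws (lb ++ [w]) (blen + 1 + PySem.Str.len w)

-- joined length bookkeeping: Σ (len w + 1) over the first c words
def S (ws : List String) (c : Nat) : Int := ((ws.take c).map (fun w => PySem.Str.len w + 1)).sum

theorem S_zero (ws : List String) : S ws 0 = 0 := by simp [S]

theorem S_cons_succ (w : String) (ws : List String) (c : Nat) :
    S (w :: ws) (c + 1) = PySem.Str.len w + 1 + S ws c := by
  simp [S, List.take_succ_cons]

theorem len_nonneg (w : String) : 0 ≤ PySem.Str.len w := by
  simp [PySem.Str.len_eq]

theorem S_mono (ws : List String) (c d : Nat) (h : c ≤ d) : S ws c ≤ S ws d := by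
  have hd : d = c + (d - c) := by omega
  rw [S, S, hd, List.take_add, List.map_append, List.sum_append]
  have : 0 ≤ (((ws.drop c).take (d - c)).map (fun w => PySem.Str.len w + 1)).sum := by
    apply List.sum_nonneg
    intro x hx
    obtain ⟨w, _, rfl⟩ := List.mem_map.mp hx
    have := len_nonneg w
    omega
  omega

theorem S_length (ws : List String) (c : Nat) (h : c ≤ ws.length) :
    S ws c = ((ws.take c).map PySem.Str.len).sum + c := by
  induction ws generalizing c with
  | nil =>
    have hc0 : c = 0 := by simpa using h
    subst hc0; simp [S]
  | cons w ws ih =>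
    cases c with
    | zero => simp [S]
    | succ c =>
      rw [S_cons_succ, ih c (by simpa using h)]
      simp [List.take_succ_cons]
      ring

theorem gCount_spec (limit : Int) : ∀ (ws : List String) (used : Int),
    gCount limit ws used ≤ ws.length ∧
    (∀ c : Nat, 0 < c → c ≤ gCount limit ws used → used + S ws c ≤ limit) ∧
    (gCount limit ws used < ws.length → limit < used + S ws (gCount limit ws used + 1)) := by
  intro ws
  induction ws with
  | nil =>
    intro used
    refine ⟨le_refl _, ?_, ?_⟩
    · intro c hc hle
      simp [gCount] at hle
      omega
    · intro h
      simp [gCount] at h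
  | cons w ws ih =>
    intro used
    by_cases hif : used + 1 + PySem.Str.len w ≤ limit
    · obtain ⟨h1, h2, h3⟩ := ih (used + 1 + PySem.Str.len w)
      simp only [gCount, if_pos hif]
      refine ⟨by simpa using h1, ?_, ?_⟩
      · intro c hc hle
        cases c with
        | zero => omega
        | succ c =>
          rw [S_cons_succ]
          cases Nat.eq_zero_or_pos c with
          | inl h0 => subst h0; rw [S_zero]; omega
          | inr hpos =>
            have := h2 c hpos (by omega)
            omega
      · intro hlt
        have := h3 (by simpa using hlt)
        rw [S_cons_succ]
        omega
    · simp only [gCount, if_neg hif]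
      refine ⟨Nat.zero_le _, by omega, ?_⟩
      intro _
      rw [show (0 : Nat) + 1 = 1 from rfl, show (1 : Nat) = 0 + 1 from rfl, S_cons_succ, S_zero]
      omega

theorem bTail_eq : ∀ (ws lb : List String) (blen : Int),
    bTail ws lb blen = lb ++ ws.take (gCount 30 ws blen) := by
  intro ws
  induction ws with
  | nil => intro lb blen; simp [bTail, gCount]
  | cons w ws ih =>
    intro lb blen
    by_cases h : blen + 1 + PySem.Str.len w ≤ 30
    · rw [bTail, if_neg (by omega), ih, gCount, if_pos h, List.take_succ_cons]
      simp
    · rw [bTail, if_pos (by omega), gCount, if_neg h, List.take_zero, List.append_nil]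

theorem mkPref_getD : ∀ (ws : List String) (last : Int) (k : Nat), k ≤ ws.length →
    (mkPref ws last).getD k 0 = last + ((ws.take k).map PySem.Str.len).sum := by
  intro ws
  induction ws with
  | nil =>
    intro last k hk
    have hk0 : k = 0 := by simpa using hk
    subst hk0; simp [mkPref]
  | cons w ws ih =>
    intro last k hk
    cases k with
    | zero => simp [mkPref]
    | succ k =>
      rw [mkPref]
      simp only [List.getD_cons_succ, List.take_succ_cons, List.map_cons, List.sum_cons]
      rw [ih (last + PySem.Str.len w) k (by simpa using hk)]
      ring

theorem lfGo_correct (pref : List Int) (loIdx : Nat) (limit : Int) (m : Nat) :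
    ∀ (fuel lo hi : Nat), hi - lo ≤ fuel → lo ≤ m → m ≤ hi →
    (∀ k, lo < k → k ≤ m →
      pref.getD k 0 - pref.getD loIdx 0 + (k : Int) - (loIdx : Int) - 1 ≤ limit) →
    (∀ k, m < k → k ≤ hi →
      ¬ pref.getD k 0 - pref.getD loIdx 0 + (k : Int) - (loIdx : Int) - 1 ≤ limit) →
    lfGo pref loIdx limit lo hi = m := by
  intro fuel
  induction fuel with
  | zero =>
    intro lo hi hf h1 h2 _ _
    rw [lfGo, dif_neg (by omega)]
    omega
  | succ f ih =>
    intro lo hi hf h1 h2 hfit hstop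
    by_cases h : lo < hi
    · rw [lfGo, dif_pos h]
      have hmid1 : lo < (lo + hi + 1) / 2 := by omega
      have hmid2 : (lo + hi + 1) / 2 ≤ hi := by omega
      simp only []
      by_cases hq : pref.getD ((lo + hi + 1) / 2) 0 - pref.getD loIdx 0 + (((lo + hi + 1) / 2 : Nat) : Int) - (loIdx : Int) - 1 ≤ limit
      · rw [if_pos hq]
        have hmm : (lo + hi + 1) / 2 ≤ m := by
          by_contra hcon
          exact hstop _ (by omega) hmid2 hq
        exact ih _ hi (by omega) hmm h2 (fun k hk1 hk2 => hfit k (by omega) hk2) hstop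
      · rw [if_neg hq]
        have hmm : m < (lo + hi + 1) / 2 := by
          by_contra hcon
          exact hq (hfit _ hmid1 (by omega))
        exact ih lo _ (by omega) h1 (by omega) hfit
          (fun k hk1 hk2 => hstop k hk1 (by omega))
    · rw [lfGo, dif_neg h]
      omega

-- words.take k splits at i: the segment sum identity used to read pref differences
theorem seg_sum (ws : List String) (i k : Nat) (hik : i ≤ k) :
    ((ws.take k).map PySem.Str.len).sum =
      ((ws.take i).map PySem.Str.len).sum + (((ws.drop i).take (k - i)).map PySem.Str.len).sum := by
  conv_lhs => rw [show k = i + (k - i) by omega, List.take_add]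
  simp [List.sum_append]

theorem split₀_go_good : ∀ (s cur : List Char) (acc : List (List Char)),
    (∀ c ∈ cur, PySem.Chars.isspace c = false) →
    (∀ w ∈ acc, GoodW w) →
    ∀ w ∈ PySem.Chars.split₀.go s cur acc, GoodW w := by
  intro s
  induction s with
  | nil =>
    intro cur acc hcur hacc w hw
    unfold PySem.Chars.split₀.go at hw
    by_cases h : cur.isEmpty = true
    · simp [h] at hw; exact hacc w hw
    · have hc : cur ≠ [] := by simpa [List.isEmpty_iff] using h
      simp [h] at hw
      rcases hw with h1 | h1
      · exact hacc w h1
      · subst h1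
        exact ⟨by simpa using hc, fun c hc' => hcur c (by simpa using hc')⟩
  | cons c rest ih =>
    intro cur acc hcur hacc w hw
    unfold PySem.Chars.split₀.go at hw
    by_cases hs : PySem.Chars.isspace c = true
    · by_cases he : cur.isEmpty = true
      · simp [hs, he] at hw
        exact ih [] acc (by simp) hacc w hw
      · have hc : cur ≠ [] := by simpa [List.isEmpty_iff] using he
        simp [hs, he] at hw
        refine ih [] (cur.reverse :: acc) (by simp) ?_ w hw
        intro v hv
        rcases List.mem_cons.mp hv with h1 | h1
        · subst h1
          exact ⟨by simpa using hc, fun d hd => hcur d (by simpa using hd)⟩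
        · exact hacc v h1
    · simp [hs] at hw
      refine ih (c :: cur) acc ?_ hacc w hw
      intro d hd
      rcases List.mem_cons.mp hd with h1 | h1
      · subst h1; simpa using hs
      · exact hcur d h1

theorem split₀_good (s : String) : ∀ w ∈ PySem.Str.split₀ s, GoodS w := by
  intro w hw
  simp only [PySem.Str.split₀, List.mem_map] at hw
  obtain ⟨q, hq, rfl⟩ := hw
  have := split₀_go_good s.toList [] [] (by simp) (by simp) q
    (by simpa [PySem.Chars.split₀] using hq)
  simpa [GoodS] using this

theorem join_space_cons (p : List Char) (ps : List (List Char)) :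
    PySem.Chars.join [' '] (p :: ps) =
      p ++ (if ps = [] then [] else ' ' :: PySem.Chars.join [' '] ps) := by
  cases ps with
  | nil => simp [PySem.Chars.join, List.intercalate]
  | cons q qs => simp [PySem.Chars.join, List.intercalate]

theorem join_good (ps : List (List Char)) (hne : ps ≠ []) (hg : ∀ p ∈ ps, GoodW p) :
    (∃ a t, PySem.Chars.join [' '] ps = a :: t ∧ PySem.Chars.isspace a = false) ∧
    (∃ ys y, PySem.Chars.join [' '] ps = ys ++ [y] ∧ PySem.Chars.isspace y = false) := by
  induction ps with
  | nil => exact absurd rfl hne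
  | cons p ps ih =>
    have hp := hg p (by simp)
    obtain ⟨a, t, rfl⟩ := List.exists_cons_of_ne_nil hp.1
    have ha : PySem.Chars.isspace a = false := hp.2 a (by simp)
    cases ps with
    | nil =>
      have hj : PySem.Chars.join [' '] [a :: t] = a :: t := by simp [PySem.Chars.join, List.intercalate]
      rw [hj]
      refine ⟨⟨a, t, rfl, ha⟩, ?_⟩
      rcases (a :: t).eq_nil_or_concat with h | ⟨ys, y, hy⟩
      · simp at h
      · exact ⟨ys, y, by simpa using hy, hp.2 y (by rw [hy]; simp)⟩
    | cons q qs =>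
      have ih' := ih (by simp) (fun v hv => hg v (List.mem_cons_of_mem _ hv))
      obtain ⟨_, ⟨ys, y, hy, hys⟩⟩ := ih'
      rw [join_space_cons]
      simp only [if_neg (by simp : ¬(q :: qs : List (List Char)) = [])]
      constructor
      · exact ⟨a, t ++ ' ' :: PySem.Chars.join [' '] (q :: qs), by simp, ha⟩
      · exact ⟨(a :: t) ++ ' ' :: ys, y, by rw [hy]; simp, hys⟩

theorem lstrip_noop (a : Char) (t : List Char) (h : PySem.Chars.isspace a = false) :
    PySem.Chars.lstrip (a :: t) = a :: t := by
  simp [PySem.Chars.lstrip, h]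

theorem rstrip_noop (ys : List Char) (y : Char) (h : PySem.Chars.isspace y = false) :
    PySem.Chars.rstrip (ys ++ [y]) = ys ++ [y] := by
  simp [PySem.Chars.rstrip, h]

theorem strip_noop (s : List Char)
    (hh : ∃ a t, s = a :: t ∧ PySem.Chars.isspace a = false)
    (hl : ∃ ys y, s = ys ++ [y] ∧ PySem.Chars.isspace y = false) :
    PySem.Chars.strip s = s := by
  obtain ⟨a, t, rfl, ha⟩ := hh
  obtain ⟨ys, y, hy, hys⟩ := hl
  rw [PySem.Chars.strip, lstrip_noop a t ha, hy, rstrip_noop ys y hys]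

theorem join_len (ps : List (List Char)) (hne : ps ≠ []) :
    ((PySem.Chars.join [' '] ps).length : Int) =
      (ps.map (fun p => (p.length : Int))).sum + ps.length - 1 := by
  induction ps with
  | nil => exact absurd rfl hne
  | cons p ps ih =>
    cases ps with
    | nil => rw [join_space_cons]; simp
    | cons q qs =>
      have ih' := ih (by simp)
      rw [join_space_cons]
      simp only [if_neg (by simp : ¬(q :: qs : List (List Char)) = [])]
      simp only [List.length_append, List.length_cons, List.map_cons, List.sum_cons] at ih' ⊢
      push_cast at ih' ⊢
      omega

theorem candLen_eq (xs : List String) (hne : xs ≠ []) (hg : ∀ w ∈ xs, GoodS w) :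
    aCandLen xs = U xs := by
  have hsep : (" " : String).toList = [' '] := rfl
  have hqne : xs.map String.toList ≠ [] := by simpa using hne
  have hqg : ∀ p ∈ xs.map String.toList, GoodW p := by
    intro p hp
    obtain ⟨w, hw, rfl⟩ := List.mem_map.mp hp
    exact hg w hw
  have hjg := join_good (xs.map String.toList) hqne hqg
  have hstrip := strip_noop _ hjg.1 hjg.2
  unfold aCandLen
  rw [PySem.Str.len, PySem.Str.toList_strip, PySem.Str.toList_join, hsep, hstrip,
      join_len _ hqne]
  unfold U
  simp only [List.length_map, List.map_map]
  rfl

theorem phase2 (maxc : Int) : ∀ (ws la lb : List String),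
    (∀ w ∈ ws, GoodS w) → (∀ w ∈ lb, GoodS w) → lb ≠ [] →
    aLoop maxc ws la lb = (la, bTail ws lb (U lb)) := by
  intro ws
  induction ws with
  | nil => intro la lb _ _ _; rfl
  | cons w ws ih =>
    intro la lb hws hlb hne
    have hw : GoodS w := hws w (by simp)
    have hws' : ∀ v ∈ ws, GoodS v := fun v hv => hws v (List.mem_cons_of_mem _ hv)
    have hlb' : ∀ v ∈ lb ++ [w], GoodS v := by
      intro v hv
      rcases List.mem_append.mp hv with h | h
      · exact hlb v h
      · simp at h; subst h; exact hw
    have hcand : aCandLen (lb ++ [w]) = U lb + 1 + PySem.Str.len w := by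
      rw [candLen_eq _ (by simp) hlb', U_append_singleton]
    rw [aLoop, if_neg (by rintro ⟨_, h⟩; exact hne h)]
    by_cases hle : aCandLen (lb ++ [w]) ≤ 30
    · rw [if_pos hle, ih la (lb ++ [w]) hws' hlb' (by simp), bTail,
        if_neg (by rw [hcand] at hle; omega), U_append_singleton]
    · rw [if_neg hle, bTail, if_pos (by rw [hcand] at hle; omega)]

theorem phase1 (maxc : Int) : ∀ (ws la : List String),
    (∀ w ∈ ws, GoodS w) → (∀ w ∈ la, GoodS w) →
    aLoop maxc ws la [] =
      (la ++ ws.take (gCount maxc ws (U la)),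
       bTail (ws.drop (gCount maxc ws (U la))) [] (-1)) := by
  intro ws
  induction ws with
  | nil => intro la _ _; simp [aLoop, gCount, bTail]
  | cons w ws ih =>
    intro la hws hla
    have hw : GoodS w := hws w (by simp)
    have hws' : ∀ v ∈ ws, GoodS v := fun v hv => hws v (List.mem_cons_of_mem _ hv)
    have hla' : ∀ v ∈ la ++ [w], GoodS v := by
      intro v hv
      rcases List.mem_append.mp hv with h | h
      · exact hla v h
      · simp at h; subst h; exact hw
    have hcand : aCandLen (la ++ [w]) = U la + 1 + PySem.Str.len w := by
      rw [candLen_eq _ (by simp) hla', U_append_singleton]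
    rw [aLoop, gCount]
    by_cases hle : U la + 1 + PySem.Str.len w ≤ maxc
    · rw [if_pos ⟨by rw [hcand]; exact hle, rfl⟩, if_pos hle]
      rw [ih (la ++ [w]) hws' hla', U_append_singleton]
      simp [List.append_assoc]
    · rw [if_neg (by rintro ⟨h, _⟩; rw [hcand] at h; exact hle h), if_neg hle]
      simp only [List.take_zero, List.append_nil, List.drop_zero, List.nil_append]
      have hwcand : aCandLen [w] = PySem.Str.len w := by
        have := candLen_eq [w] (by simp) (by intro v hv; simp at hv; subst hv; exact hw)
        rw [this]; simp [U]
      by_cases h30 : aCandLen [w] ≤ 30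
      · rw [if_pos (by simpa using h30),
          phase2 maxc ws la [w] hws' (by intro v hv; simp at hv; subst hv; exact hw) (by simp)]
        rw [bTail, if_neg (by rw [hwcand] at h30; omega)]
        congr 1
        simp [U]
      · rw [if_neg (by simpa using h30), bTail, if_pos (by rw [hwcand] at h30; omega)]

-- the two binary searches of B compute exactly A's greedy break indices
theorem lfGo_first (words : List String) (maxc : Int) :
    lfGo (mkPref words 0) 0 maxc 0 words.length = gCount maxc words (-1) := by
  obtain ⟨h1, h2, h3⟩ := gCount_spec maxc words (-1)
  apply lfGo_correct _ _ _ _ words.length 0 words.length (by omega) (Nat.zero_le _) h1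
  · intro k hk1 hk2
    rw [mkPref_getD words 0 k (by omega), mkPref_getD words 0 0 (by omega)]
    have := h2 k hk1 hk2
    rw [S_length words k (by omega)] at this
    simp only [List.take_zero, List.map_nil, List.sum_nil]
    omega
  · intro k hk1 hk2
    rw [mkPref_getD words 0 k (by omega), mkPref_getD words 0 0 (by omega)]
    have hs := h3 (by omega)
    have hm := S_mono words (gCount maxc words (-1) + 1) k (by omega)
    rw [S_length words k (by omega)] at hm
    simp only [List.take_zero, List.map_nil, List.sum_nil]
    omega

theorem lfGo_second (words : List String) (i : Nat) (hi : i ≤ words.length) :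
    lfGo (mkPref words 0) i 30 i words.length = i + gCount 30 (words.drop i) (-1) := by
  obtain ⟨h1, h2, h3⟩ := gCount_spec 30 (words.drop i) (-1)
  rw [List.length_drop] at h1 h3
  apply lfGo_correct _ _ _ _ words.length i words.length (by omega) (by omega) (by omega)
  · intro k hk1 hk2
    rw [mkPref_getD words 0 k (by omega), mkPref_getD words 0 i (by omega)]
    have := h2 (k - i) (by omega) (by omega)
    rw [S_length (words.drop i) (k - i) (by rw [List.length_drop]; omega)] at this
    rw [seg_sum words i k (by omega)]
    omega
  · intro k hk1 hk2
    rw [mkPref_getD words 0 k (by omega), mkPref_getD words 0 i (by omega)]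
    have hs := h3 (by omega)
    have hm := S_mono (words.drop i) (gCount 30 (words.drop i) (-1) + 1) (k - i) (by omega)
    rw [S_length (words.drop i) (k - i) (by rw [List.length_drop]; omega)] at hm
    rw [seg_sum words i k (by omega)]
    omega

-- ===== VERDICT (by name: the statement is the Claim_ definition above) =====
theorem split_headline_py_spec : Claim_equal_split_headline_py := by
  intro headline maxc _
  unfold Spec_split_headline_py split_headline_py split_headline_py_alt
  by_cases hc : PySem.Str.len (PySem.Str.strip (PySem.Str.upper headline)) ≤ maxc
  · rw [if_pos hc, if_pos hc]
  · rw [if_neg hc]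
    set words := PySem.Str.split₀ (PySem.Str.strip (PySem.Str.upper headline)) with hwords
    have hgood : ∀ w ∈ words, GoodS w := split₀_good _
    set ig := gCount maxc words (-1) with hig
    have higle : ig ≤ words.length := (gCount_spec maxc words (-1)).1
    set g2 := gCount 30 (words.drop ig) (-1) with hg2
    have hg2le : g2 ≤ (words.drop ig).length := (gCount_spec 30 (words.drop ig) (-1)).1
    have hA := phase1 maxc words [] hgood (by simp)
    rw [U_nil] at hA
    simp only [List.nil_append] at hA
    have hBT := bTail_eq (words.drop ig) [] (-1)
    simp only [List.nil_append] at hBT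
    have hfst := lfGo_first words maxc
    have hsnd := lfGo_second words ig higle
    simp only [if_neg hc, hA, hBT, ← hig, ← hg2, hfst, hsnd]
    by_cases h0 : g2 = 0
    · rw [if_pos (by simp [h0]), if_pos (by omega)]
    · have hne : words.drop ig ≠ [] := by
        intro h
        apply h0
        rw [hg2, h]
        rfl
      rw [if_neg (by
            intro h
            rcases List.take_eq_nil_iff.mp h with h' | h'
            · exact h0 h'
            · exact hne h'),
          if_neg (by omega)]
      simp
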